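-- pv_equiv track=rewrite | github.com/solver57/solver57 | app/xl.py | find_unique_matrices
-- ===== SOURCE A (Python) =====
-- def rotate_matrix(matrix):
--     """Поворачивает матрицу на 90 градусов по часовой стрелке."""
--     return [list(row) for row in zip(*matrix[::-1])]
--
-- def reflect_matrix(matrix):
--     """Отражает матрицу по горизонтали."""
--     return [row[::-1] for row in matrix]
--
-- def generate_all_variants(matrix):
--     """Генерирует все 8 вариантов матрицы (повороты и отражения)."""
--     variants = []
--     current = matrix
--     for _ in range(4):  # 4 поворота
--         variants.append(current)
--         variants.append(reflect_matrix(current))  # Отражение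
--         current = rotate_matrix(current)  # Поворот на 90 градусов
--     return variants
--
-- def find_unique_matrices(matrices):
--     """Возвращает список уникальных матриц с точностью до поворотов и отражений."""
--     unique_matrices = []
--     for matrix in matrices:
--         # Генерируем все варианты текущей матрицы
--         variants = generate_all_variants(matrix)
--         # Проверяем, есть ли хотя бы один вариант в списке уникальных
--         is_unique = True
--         for variant in variants:
--             if variant in unique_matrices:
--                 is_unique = False
--                 break
--         # Если матрица уникальна, добавляем её в список
--         if is_unique:
--             unique_matrices.append(matrix)
--     return unique_matrices
-- ===== SOURCE B (Python) =====
-- def find_unique_matrices(matrices):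
--     """Возвращает список уникальных матриц с точностью до поворотов и отражений."""
--     n = len(matrices)
--     # Inverted index: for every matrix key, the candidates it would eliminate.
--     hitters = {}
--     for j, m in enumerate(matrices):
--         vkeys = set()
--         cur = m
--         for _ in range(4):
--             vkeys.add(tuple(tuple(row) for row in cur))
--             vkeys.add(tuple(tuple(row[::-1]) for row in cur))
--             cur = [list(row) for row in zip(*cur[::-1])]
--         for k in vkeys:
--             hitters.setdefault(k, []).append(j)
--     # Forward pass: keep unkilled candidates, propagate kills to later ones.
--     killed = [False] * n
--     result = []
--     for i in range(n):
--         if killed[i]: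
--             continue
--         result.append(matrices[i])
--         for j in hitters.get(tuple(tuple(row) for row in matrices[i]), ()):
--             if j > i:
--                 killed[j] = True
--     return result
-- ===== Notes on version B (the rewrite author's own statement) =====
-- stated objective: alternative
-- what changed: A pulls: for each matrix it scans the whole kept list once per each of its 8 variants; B pushes: it first builds an inverted index mapping each matrix key to the candidates whose variant set contains it, then a single forward pass keeps unkilled candidates and marks the candidates each kept key eliminates, so no membership scan over the kept list remains (canonical-form dedup was not used because zip-based rotation is lossy on ragged matrices, making A's relation asymmetric); …
import Mathlib
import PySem

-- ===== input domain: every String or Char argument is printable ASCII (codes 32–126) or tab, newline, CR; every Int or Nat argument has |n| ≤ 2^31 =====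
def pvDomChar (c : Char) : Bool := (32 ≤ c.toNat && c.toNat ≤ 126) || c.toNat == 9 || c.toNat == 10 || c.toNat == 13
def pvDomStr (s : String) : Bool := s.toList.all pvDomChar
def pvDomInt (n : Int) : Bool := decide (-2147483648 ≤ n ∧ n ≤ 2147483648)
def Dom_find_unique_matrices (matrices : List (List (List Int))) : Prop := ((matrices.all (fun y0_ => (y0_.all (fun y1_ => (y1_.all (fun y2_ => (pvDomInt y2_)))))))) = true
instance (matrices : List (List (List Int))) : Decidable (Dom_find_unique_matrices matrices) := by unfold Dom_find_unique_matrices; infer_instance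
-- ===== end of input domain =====

-- B replaces A's per-candidate membership scans of the kept list by an inverted index
-- (matrix key -> candidates whose variant set contains it) plus one forward
-- kill-propagation pass (objective: alternative).


-- ===== PORT A =====
-- Python zip(*rows): emit the heads of all rows, recurse on the tails, stop as soon as
-- some row is exhausted (or there are no rows at all) — exact truncating semantics.
def pyZip (rows : List (List Int)) : List (List Int) :=
  if h : rows = [] ∨ rows.any (fun r => r.isEmpty) then []
  else (rows.map (fun r => r.headD 0)) :: pyZip (rows.map (fun r => r.tail))
termination_by (rows.headD []).length
decreasing_by
  rcases rows with _ | ⟨a, as⟩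
  · exact absurd (Or.inl rfl) h
  · have ha : a ≠ [] := fun e => h (Or.inr (by simp [e]))
    rcases a with _ | ⟨x, xs⟩
    · exact absurd rfl ha
    · simp

def rotate_matrix (matrix : List (List Int)) : List (List Int) :=
  pyZip matrix.reverse

def reflect_matrix (matrix : List (List Int)) : List (List Int) :=
  matrix.map List.reverse

def generate_all_variants (matrix : List (List Int)) : List (List (List Int)) :=
  ((List.range 4).foldl
    (fun (st : List (List (List Int)) × List (List Int)) _ =>
      (st.1 ++ [st.2, reflect_matrix st.2], rotate_matrix st.2))
    ([], matrix)).1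

def find_unique_matrices (matrices : List (List (List Int))) : List (List (List Int)) :=
  matrices.foldl
    (fun unique_matrices matrix =>
      let variants := generate_all_variants matrix
      if variants.any (fun v => unique_matrices.contains v) then unique_matrices
      else unique_matrices ++ [matrix])
    []

-- ===== PORT B =====
-- Python's tuple-of-tuples key of a matrix is the matrix itself under the list encoding,
-- so keys are the matrices; `vkeysB` is B's inner 4-step loop building the set `vkeys`.
def vkeysB (m : List (List Int)) : PySem.Set (List (List Int)) :=
  ((List.range 4).foldl
    (fun (st : PySem.Set (List (List Int)) × List (List Int)) _ =>
      (PySem.Set.add (PySem.Set.add st.1 st.2) (st.2.map List.reverse), pyZip st.2.reverse))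
    (PySem.Set.empty, m)).1

-- hitters: dict key -> indices j whose variant set contains the key
-- (setdefault(k, []).append(j) = Dict.modify k [] (· ++ [j])).
def hittersB (matrices : List (List (List Int))) : PySem.Dict (List (List Int)) (List Int) :=
  (PySem.List.enumerate matrices 0).foldl
    (fun d jm => (vkeysB jm.2).foldl (fun d k => d.modify k [] (· ++ [jm.1])) d)
    PySem.Dict.empty

def find_unique_matrices_alt (matrices : List (List (List Int))) : List (List (List Int)) :=
  ((PySem.List.pyRange 0 (matrices.length : Int) 1).foldl
    (fun (st : List Bool × List (List (List Int))) i =>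
      if PySem.List.pyGetD st.1 i false then st
      else
        (((hittersB matrices).getD (PySem.List.pyGetD matrices i []) []).foldl
           (fun killed j => if i < j then PySem.List.pySetD killed j true else killed)
           st.1,
         st.2 ++ [PySem.List.pyGetD matrices i []]))
    (List.replicate matrices.length false, [])).2

-- ===== PRECONDITION & SPEC =====
def Spec_find_unique_matrices (matrices : List (List (List Int))) (out : List (List (List Int))) : Prop := out = find_unique_matrices_alt matrices
instance (matrices : List (List (List Int))) (out : List (List (List Int))) : Decidable (Spec_find_unique_matrices matrices out) := by unfold Spec_find_unique_matrices; infer_instance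

-- ===== CLAIM (what is proved, stated in full; the proofs are below) =====
def Claim_equal_find_unique_matrices : Prop := ∀ (matrices : List (List (List Int))), Dom_find_unique_matrices matrices → Spec_find_unique_matrices matrices (find_unique_matrices matrices)

-- ===== LEMMAS AND PROOFS =====

-- A's accumulator step, named for the proofs.
def stepA (u : List (List (List Int))) (m : List (List Int)) : List (List (List Int)) :=
  if (generate_all_variants m).any (fun v => u.contains v) then u else u ++ [m]

-- B's forward-pass body at a Nat index, named for the proofs.
def bodyN (ms : List (List (List Int))) (st : List Bool × List (List (List Int))) (t : Nat) :
    List Bool × List (List (List Int)) :=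
  if PySem.List.pyGetD st.1 ((t : Nat) : Int) false then st
  else
    (((hittersB ms).getD (PySem.List.pyGetD ms ((t : Nat) : Int) []) []).foldl
       (fun killed j => if ((t : Nat) : Int) < j then PySem.List.pySetD killed j true else killed)
       st.1,
     st.2 ++ [PySem.List.pyGetD ms ((t : Nat) : Int) []])

lemma findA_eq (ms : List (List (List Int))) :
    find_unique_matrices ms = ms.foldl stepA [] := rfl

lemma stepA_pos {u : List (List (List Int))} {m : List (List Int)}
    (h : ∃ u' ∈ u, u' ∈ generate_all_variants m) : stepA u m = u := by
  obtain ⟨u', hu, hv⟩ := h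
  have hc : ((generate_all_variants m).any fun v => u.contains v) = true := by
    simp only [List.any_eq_true, List.contains_eq_mem, decide_eq_true_eq]
    exact ⟨u', hv, hu⟩
  simp only [stepA, if_pos hc]

lemma stepA_neg {u : List (List (List Int))} {m : List (List Int)}
    (h : ¬ ∃ u' ∈ u, u' ∈ generate_all_variants m) : stepA u m = u ++ [m] := by
  refine if_neg ?_
  simp only [List.any_eq_true, List.contains_eq_mem, decide_eq_true_eq]
  exact fun ⟨v, hv, hvu⟩ => h ⟨v, hvu, hv⟩

-- B's variant-key set holds exactly A's 8 variants.
lemma mem_vkeysB (m x : List (List Int)) :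
    x ∈ vkeysB m ↔ x ∈ generate_all_variants m := by
  simp only [vkeysB, generate_all_variants, rotate_matrix, reflect_matrix,
    List.range_succ, List.range_zero, List.foldl_append, List.foldl_cons, List.foldl_nil,
    List.nil_append, PySem.Set.mem_add, List.mem_append, List.mem_cons, List.not_mem_nil,
    PySem.Set.empty]
  tauto

-- The nested hitters-building loop, flattened to one fold over key/index pairs.
lemma hittersB_eq_flat (ms : List (List (List Int))) :
    hittersB ms
      = ((PySem.List.enumerate ms 0).flatMap
           (fun jm => (vkeysB jm.2).map (fun k => (k, jm.1)))).foldl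
          (fun d p => d.modify p.1 [] (· ++ [p.2])) PySem.Dict.empty := by
  unfold hittersB
  generalize (PySem.Dict.empty : PySem.Dict (List (List Int)) (List Int)) = d
  induction PySem.List.enumerate ms 0 generalizing d with
  | nil => rfl
  | cons jm l ih =>
    simp only [List.foldl_cons, List.flatMap_cons, List.foldl_append, List.foldl_map]
    exact ih _

-- Membership in a hitters bucket: exactly the indices whose variant set holds the key.
lemma mem_hittersB (ms : List (List (List Int))) (k : List (List Int)) (j : Int) :
    j ∈ (hittersB ms).getD k [] ↔
      ∃ t : Nat, t < ms.length ∧ j = (t : Int) ∧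
        k ∈ generate_all_variants (ms.getD t []) := by
  rw [hittersB_eq_flat, PySem.Dict.getD_foldl_modify_append]
  simp only [PySem.Dict.getD_empty, List.nil_append]
  rw [List.mem_map]
  constructor
  · rintro ⟨p, hp, rfl⟩
    rw [List.mem_filter] at hp
    obtain ⟨hpmem, hpk⟩ := hp
    rw [List.mem_flatMap] at hpmem
    obtain ⟨jm, hjm, hpin⟩ := hpmem
    rw [PySem.List.mem_enumerate_iff] at hjm
    obtain ⟨t, ht, rfl⟩ := hjm
    rw [List.mem_map] at hpin
    obtain ⟨k', hk', rfl⟩ := hpin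
    have hkk : k' = k := by simpa using hpk
    subst hkk
    refine ⟨t, ht, by simp, ?_⟩
    rw [List.getD_eq_getElem ms [] ht]
    exact (mem_vkeysB _ _).mp hk'
  · rintro ⟨t, ht, rfl, hk⟩
    refine ⟨(k, (t : Int)), ?_, rfl⟩
    rw [List.mem_filter]
    refine ⟨?_, by simp⟩
    rw [List.mem_flatMap]
    refine ⟨((0 : Int) + (t : Int), ms[t]), ?_, ?_⟩
    · rw [PySem.List.mem_enumerate_iff]
      exact ⟨t, ht, rfl⟩
    · rw [List.mem_map]
      refine ⟨k, ?_, by simp⟩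
      rw [List.getD_eq_getElem ms [] ht] at hk
      exact (mem_vkeysB _ _).mpr hk

-- The marking fold keeps the length of the killed array.
lemma mark_length (js : List Int) (i : Int) (killed : List Bool) :
    (js.foldl (fun k x => if i < x then PySem.List.pySetD k x true else k) killed).length
      = killed.length := by
  induction js generalizing killed with
  | nil => rfl
  | cons x xs ih =>
    simp only [List.foldl_cons]
    split
    · rw [ih, PySem.List.length_pySetD]
    · exact ih killed

-- What the marking fold leaves at index j.
lemma mark_getD (js : List Int) (i : Int) (killed : List Bool)
    (hjs : ∀ x ∈ js, ∃ t : Nat, x = (t : Int) ∧ t < killed.length) (j : Nat) :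
    (js.foldl (fun k x => if i < x then PySem.List.pySetD k x true else k) killed).getD j false
      = (killed.getD j false || decide (∃ x ∈ js, i < x ∧ x = (j : Int))) := by
  induction js generalizing killed with
  | nil => simp
  | cons x xs ih =>
    obtain ⟨t, rfl, ht⟩ := hjs x (by simp)
    simp only [List.foldl_cons]
    by_cases hix : i < (t : Int)
    · rw [if_pos hix, PySem.List.pySetD_natCast]
      rw [ih (killed.set t true) (fun y hy => by
        obtain ⟨s, rfl, hs⟩ := hjs y (by simp [hy])
        exact ⟨s, rfl, by simpa using hs⟩)]
      by_cases hjt : t = j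
      · subst hjt
        simp [List.getD_eq_getElem?_getD, ht, hix]
      · have hset : (killed.set t true).getD j false = killed.getD j false := by
          simp [List.getD_eq_getElem?_getD, hjt]
        rw [hset]
        have hjt' : ¬ (j = t) := fun h => hjt h.symm
        simp [hjt']
    · rw [if_neg hix, ih killed (fun y hy => hjs y (by simp [hy]))]
      have : (∃ x ∈ (t : Int) :: xs, i < x ∧ x = (j : Int))
            ↔ (∃ x ∈ xs, i < x ∧ x = (j : Int)) := by
        constructor
        · rintro ⟨x, hx, h1, h2⟩
          rcases List.mem_cons.mp hx with rfl | hx'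
          · exact absurd h1 hix
          · exact ⟨x, hx', h1, h2⟩
        · rintro ⟨x, hx, h1, h2⟩; exact ⟨x, by simp [hx], h1, h2⟩
      simp only [this]

-- A's fold over one more element of the input.
lemma foldA_take_succ (ms : List (List (List Int))) (i : Nat) (hi : i < ms.length) :
    (ms.take (i + 1)).foldl stepA [] = stepA ((ms.take i).foldl stepA []) (ms.getD i []) := by
  have h1 : ms.take (i + 1) = ms.take i ++ [ms[i]] := by
    rw [List.take_add_one, List.getElem?_eq_getElem hi]
    rfl
  rw [h1, List.foldl_append, List.foldl_cons, List.foldl_nil, List.getD_eq_getElem ms [] hi]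

-- Main invariant of B's forward pass: the killed array records exactly A's rejection
-- test against the kept list built so far.
lemma main_inv (ms : List (List (List Int))) :
    ∀ (c i : Nat) (killed : List Bool) (res : List (List (List Int))),
      i + c = ms.length →
      killed.length = ms.length →
      res = (ms.take i).foldl stepA [] →
      (∀ j : Nat, i ≤ j → j < ms.length →
        killed.getD j false
          = decide (∃ u ∈ res, u ∈ generate_all_variants (ms.getD j []))) →
      ((List.range' i c).foldl (bodyN ms) (killed, res)).2 = ms.foldl stepA [] := by
  intro c
  induction c with
  | zero =>
    intro i killed res hic _ hres _
    have : i = ms.length := by omega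
    subst this
    simp only [List.range', List.foldl_nil]
    rw [hres, List.take_of_length_le (le_refl _)]
  | succ c ih =>
    intro i killed res hic hlen hres hk
    have hi : i < ms.length := by omega
    have hrange : List.range' i (c + 1) = i :: List.range' (i + 1) c := List.range'_succ ..
    rw [hrange, List.foldl_cons]
    have hgetms : PySem.List.pyGetD ms ((i : Nat) : Int) [] = ms.getD i [] := by
      simp [PySem.List.pyGetD_natCast]
    have hgetk : PySem.List.pyGetD killed ((i : Nat) : Int) false = killed.getD i false := by
      simp [PySem.List.pyGetD_natCast]
    by_cases hhit : ∃ u ∈ res, u ∈ generate_all_variants (ms.getD i [])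
    · have hb : bodyN ms (killed, res) i = (killed, res) := by
        simp only [bodyN, hgetk, hk i (le_refl _) hi]
        rw [if_pos (by simpa using hhit)]
      rw [hb]
      refine ih (i + 1) killed res (by omega) hlen ?_ ?_
      · rw [foldA_take_succ ms i hi, ← hres, stepA_pos hhit]
      · intro j hj hjn; exact hk j (by omega) hjn
    · have hcond : killed.getD i false = false := by
        rw [hk i (le_refl _) hi]; simpa using hhit
      have hstep : bodyN ms (killed, res) i
          = (((hittersB ms).getD (ms.getD i []) []).foldl
               (fun k j => if ((i : Nat) : Int) < j then PySem.List.pySetD k j true else k)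
               killed,
             res ++ [ms.getD i []]) := by
        simp only [bodyN, hgetk, hgetms, hcond]
        rw [if_neg (by simp)]
      rw [hstep]
      set H := (hittersB ms).getD (ms.getD i []) [] with hH
      have hjs : ∀ x ∈ H, ∃ t : Nat, x = (t : Int) ∧ t < killed.length := by
        intro x hx
        obtain ⟨t, ht, rfl, _⟩ := (mem_hittersB ms _ x).mp hx
        exact ⟨t, rfl, by omega⟩
      refine ih (i + 1) _ _ (by omega) (by rw [mark_length]; exact hlen) ?_ ?_
      · rw [foldA_take_succ ms i hi, ← hres, stepA_neg hhit]
      · intro j hj hjn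
        rw [mark_getD H _ killed hjs j]
        rw [hk j (by omega) hjn]
        have hQ : (∃ x ∈ H, ((i : Nat) : Int) < x ∧ x = (j : Int))
            ↔ ms.getD i [] ∈ generate_all_variants (ms.getD j []) := by
          constructor
          · rintro ⟨x, hx, _, rfl⟩
            obtain ⟨t, _, hje, hmem⟩ := (mem_hittersB ms _ _).mp hx
            have hteq : t = j := by exact_mod_cast hje.symm
            subst hteq
            exact hmem
          · intro hmem
            exact ⟨(j : Int), (mem_hittersB ms _ _).mpr ⟨j, hjn, rfl, hmem⟩,
              by exact_mod_cast (by omega : i < j), rfl⟩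
        rw [← Bool.decide_or]
        refine decide_eq_decide.mpr ?_
        rw [hQ]
        constructor
        · rintro (⟨u, hu, hv⟩ | hmi)
          · exact ⟨u, by simp [hu], hv⟩
          · exact ⟨ms.getD i [], by simp, hmi⟩
        · rintro ⟨u, hu, hv⟩
          rcases List.mem_append.mp hu with hu' | hu'
          · exact Or.inl ⟨u, hu', hv⟩
          · have huv : u = ms.getD i [] := by simpa using hu'
            exact Or.inr (huv ▸ hv)

-- ===== VERDICT (by name: the statement is the Claim_ definition above) =====
theorem find_unique_matrices_spec : Claim_equal_find_unique_matrices := by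
  intro ms _
  unfold Spec_find_unique_matrices
  rw [findA_eq]
  show ms.foldl stepA [] = find_unique_matrices_alt ms
  unfold find_unique_matrices_alt
  rw [PySem.List.pyRange_zero_natCast, List.foldl_map, List.range_eq_range']
  exact (main_inv ms ms.length 0 (List.replicate ms.length false) []
    (Nat.zero_add _) (List.length_replicate ..) rfl
    (fun j _ hj => by simp [List.getD_eq_getElem?_getD, hj])).symm
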